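-- pv_equiv track=rewrite | github.com/Archaversine/asteroidea | TapeVisualizer.py | visualize_str
-- ===== SOURCE A (Python) =====
-- def visualize_str(tape: list, selected_pos: int = -1, start: int = 0, cells: int = 0) -> str:
--
--     output = ''
--
--     #iterations = lambda: range(start, len(tape[start:start+(cells or len(tape))]) + 1)
--     upper = min(start + (cells or len(tape)) + 1, len(tape) + 1)
--     iterations = lambda: range(start, upper)
--
--     for i in iterations():
--         cell_header = f'{"▼" if i - 1 == selected_pos and i != 0 else "": ^5}'
--         output += f'{cell_header} '
--
--     output += ' ' * 5 + '\n'
--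
--     for _ in iterations():
--         output += '─────┬'
--
--     output += '─────\n'
--
--     for i in iterations():
--
--         center = str(tape[i - 1] if i - start > 0 else ('...' if start != 0 else ''))
--
--         if len(center) == 2:
--             center = ' ' + center
--
--         output += f'{center : ^5}│'
--
--     output += f'{("..." if upper <= len(tape) else "" ) : ^5}\n'
--
--     for _ in iterations():
--         output += '─────┴'
--
--     output += '─────\n'
--
--     for i in iterations():
--         cell_header = f'{"▲" if i - 1 == selected_pos and i != 0 else "": ^5}'
--         output += f'{cell_header} '
--
--     output += ' ' * 5 + '\n'
--     return output
-- ===== SOURCE B (Python) =====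
-- def visualize_str(tape: list, selected_pos: int = -1, start: int = 0, cells: int = 0) -> str:
--     n = len(tape)
--     upper = min(start + (cells or n) + 1, n + 1)
--     head = top = mid = bot = foot = ''
--     for i in range(start, upper):
--         marked = i - 1 == selected_pos and i != 0
--         head += '  \u25bc   ' if marked else '      '
--         foot += '  \u25b2   ' if marked else '      '
--         top += '\u2500\u2500\u2500\u2500\u2500\u252c'
--         bot += '\u2500\u2500\u2500\u2500\u2500\u2534'
--         if i > start:
--             center = str(tape[i - 1])
--         else:
--             center = '...' if start != 0 else ''
--         if len(center) == 2:
--             center = ' ' + center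
--         pad = 5 - len(center)
--         if pad < 0:
--             pad = 0
--         mid += ' ' * (pad // 2) + center + ' ' * (pad - pad // 2) + '\u2502'
--     tail_mid = ' ... ' if upper <= n else '     '
--     return (head + '     \n' + top + '\u2500' * 5 + '\n'
--             + mid + tail_mid + '\n' + bot + '\u2500' * 5 + '\n'
--             + foot + '     \n')
-- ===== Notes on version B (the rewrite author's own statement) =====
-- stated objective: alternative
-- what changed: B builds the five output lines in a single pass over the cell range with five accumulators (and precomputed marker/border cell literals), instead of A's five separate loops over the same range concatenating into one string.
import Mathlib
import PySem

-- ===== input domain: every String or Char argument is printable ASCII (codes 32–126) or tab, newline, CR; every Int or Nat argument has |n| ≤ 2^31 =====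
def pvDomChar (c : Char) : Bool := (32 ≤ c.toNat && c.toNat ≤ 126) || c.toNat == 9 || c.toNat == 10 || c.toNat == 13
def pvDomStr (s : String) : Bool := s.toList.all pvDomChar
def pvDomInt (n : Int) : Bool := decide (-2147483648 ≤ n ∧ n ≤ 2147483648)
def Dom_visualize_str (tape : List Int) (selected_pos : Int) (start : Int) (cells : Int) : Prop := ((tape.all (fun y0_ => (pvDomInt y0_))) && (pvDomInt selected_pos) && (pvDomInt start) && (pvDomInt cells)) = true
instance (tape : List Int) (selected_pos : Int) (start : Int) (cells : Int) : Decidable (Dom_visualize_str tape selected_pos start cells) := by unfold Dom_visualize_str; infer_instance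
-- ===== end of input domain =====

-- B makes ONE pass over the cell range maintaining the five output lines, instead of A's
-- five separate loops over the same range (objective: alternative decomposition, same cost).

-- ===== PORT A =====

-- f'{s : ^5}': centre s in width 5, extra space on the right (no-op when len s ≥ 5,
-- exactly like Python, since Nat subtraction clamps the pad at 0)
def pvCenter5 (s : List Char) : List Char :=
  let pad := 5 - s.length
  List.replicate (pad / 2) ' ' ++ s ++ List.replicate (pad - pad / 2) ' '

def visualize_str (tape : List Int) (selected_pos : Int) (start : Int) (cells : Int) : String :=
  -- upper = min(start + (cells or len(tape)) + 1, len(tape) + 1)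
  let upper : Int := min (start + (if cells = 0 then (tape.length : Int) else cells) + 1) ((tape.length : Int) + 1)
  let iter := PySem.List.pyRange start upper 1
  let out : List Char := iter.foldl (fun acc i =>
      acc ++ (pvCenter5 (if i - 1 = selected_pos ∧ i ≠ 0 then ['▼'] else []) ++ [' '])) []
  let out := out ++ (List.replicate 5 ' ' ++ ['\n'])
  let out := iter.foldl (fun acc _ => acc ++ ['─','─','─','─','─','┬']) out
  let out := out ++ ['─','─','─','─','─','\n']
  let out := iter.foldl (fun acc i =>
      -- tape[i-1] only read with Pre_ guaranteeing the index is in Python range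
      let center := if 0 < i - start then PySem.Int.toChars (PySem.List.pyGetD tape (i - 1) 0)
                    else (if start ≠ 0 then ['.','.','.'] else [])
      let center := if center.length = 2 then ' ' :: center else center
      acc ++ (pvCenter5 center ++ ['│'])) out
  let out := out ++ (pvCenter5 (if upper ≤ (tape.length : Int) then ['.','.','.'] else []) ++ ['\n'])
  let out := iter.foldl (fun acc _ => acc ++ ['─','─','─','─','─','┴']) out
  let out := out ++ ['─','─','─','─','─','\n']
  let out := iter.foldl (fun acc i =>
      acc ++ (pvCenter5 (if i - 1 = selected_pos ∧ i ≠ 0 then ['▲'] else []) ++ [' '])) out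
  let out := out ++ (List.replicate 5 ' ' ++ ['\n'])
  String.ofList out

-- ===== PORT B =====

-- one step of Source B's single loop: extend the five lines (head, top, mid, bot, foot)
def pvStep (tape : List Int) (selected_pos : Int) (start : Int)
    (s : List Char × List Char × List Char × List Char × List Char) (i : Int) :
    List Char × List Char × List Char × List Char × List Char :=
  let marked := i - 1 = selected_pos ∧ i ≠ 0
  let head := s.1 ++ (if marked then [' ',' ','▼',' ',' ',' '] else List.replicate 6 ' ')
  let top := s.2.1 ++ ['─','─','─','─','─','┬']
  let bot := s.2.2.2.1 ++ ['─','─','─','─','─','┴']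
  let foot := s.2.2.2.2 ++ (if marked then [' ',' ','▲',' ',' ',' '] else List.replicate 6 ' ')
  let center := if start < i then PySem.Int.toChars (PySem.List.pyGetD tape (i - 1) 0)
                else (if start ≠ 0 then ['.','.','.'] else [])
  let center := if center.length = 2 then ' ' :: center else center
  -- pad = 5 - len(center), clamped at 0 (Nat subtraction is exactly Source B's clamp)
  let pad := 5 - center.length
  let mid := s.2.2.1 ++ (List.replicate (pad / 2) ' ' ++ center ++ List.replicate (pad - pad / 2) ' ' ++ ['│'])
  (head, top, mid, bot, foot)

def visualize_str_alt (tape : List Int) (selected_pos : Int) (start : Int) (cells : Int) : String :=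
  let n : Int := tape.length
  let upper : Int := min (start + (if cells = 0 then n else cells) + 1) (n + 1)
  let s := (PySem.List.pyRange start upper 1).foldl (pvStep tape selected_pos start) ([], [], [], [], [])
  let tail_mid := if upper ≤ n then [' ','.','.','.',' '] else List.replicate 5 ' '
  String.ofList (s.1 ++ [' ',' ',' ',' ',' ','\n']
    ++ s.2.1 ++ ['─','─','─','─','─','\n']
    ++ s.2.2.1 ++ tail_mid ++ ['\n']
    ++ s.2.2.2.1 ++ ['─','─','─','─','─','\n']
    ++ s.2.2.2.2 ++ [' ',' ',' ',' ',' ','\n'])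

-- ===== PRECONDITION & SPEC =====
-- Pre_ excludes exactly the inputs where A raises IndexError: start below -len(tape)
-- while the loop still reads a cell (upper ≥ start + 2).
def Pre_visualize_str (tape : List Int) (selected_pos : Int) (start : Int) (cells : Int) : Prop :=
  let upper : Int := min (start + (if cells = 0 then (tape.length : Int) else cells) + 1) ((tape.length : Int) + 1)
  upper ≤ start + 1 ∨ -(tape.length : Int) ≤ start
instance (tape : List Int) (selected_pos : Int) (start : Int) (cells : Int) : Decidable (Pre_visualize_str tape selected_pos start cells) := by unfold Pre_visualize_str; infer_instance

def pvWitness_visualize_str : List Int × Int × Int × Int := ([1, 2, 33], 1, 0, 0)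

def Spec_visualize_str (tape : List Int) (selected_pos : Int) (start : Int) (cells : Int) (out : String) : Prop := out = visualize_str_alt tape selected_pos start cells
instance (tape : List Int) (selected_pos : Int) (start : Int) (cells : Int) (out : String) : Decidable (Spec_visualize_str tape selected_pos start cells out) := by unfold Spec_visualize_str; infer_instance

-- ===== CLAIM (what is proved, stated in full; the proofs are below) =====
def Claim_equal_visualize_str : Prop := ∀ (tape : List Int) (selected_pos : Int) (start : Int) (cells : Int), Dom_visualize_str tape selected_pos start cells → Pre_visualize_str tape selected_pos start cells → Spec_visualize_str tape selected_pos start cells (visualize_str tape selected_pos start cells)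

-- ===== LEMMAS AND PROOFS =====

-- B's single five-accumulator fold is, componentwise, the five flatMaps A's loops produce
theorem pvStep_foldl (tape : List Int) (selected_pos : Int) (start : Int) (l : List Int)
    (h t m b f : List Char) :
    l.foldl (pvStep tape selected_pos start) (h, t, m, b, f) =
      (h ++ l.flatMap (fun i => (pvCenter5 (if i - 1 = selected_pos ∧ i ≠ 0 then ['▼'] else []) ++ [' '])),
       t ++ l.flatMap (fun _ => ['─','─','─','─','─','┬']),
       m ++ l.flatMap (fun i =>
          let center := if 0 < i - start then PySem.Int.toChars (PySem.List.pyGetD tape (i - 1) 0)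
                        else (if start ≠ 0 then ['.','.','.'] else [])
          let center := if center.length = 2 then ' ' :: center else center
          (pvCenter5 center ++ ['│'])),
       b ++ l.flatMap (fun _ => ['─','─','─','─','─','┴']),
       f ++ l.flatMap (fun i => (pvCenter5 (if i - 1 = selected_pos ∧ i ≠ 0 then ['▲'] else []) ++ [' ']))) := by
  induction l generalizing h t m b f with
  | nil => simp
  | cons x xs ih =>
    simp only [List.foldl_cons, List.flatMap_cons, pvStep, ih, Prod.mk.injEq]
    refine ⟨?_, by simp [List.append_assoc], ?_, by simp [List.append_assoc], ?_⟩
    · split <;> simp [pvCenter5, List.replicate, List.append_assoc]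
    · simp [pvCenter5, Int.sub_pos, List.append_assoc]
    · split <;> simp [pvCenter5, List.replicate, List.append_assoc]

theorem visualize_str_eq_alt (tape : List Int) (selected_pos : Int) (start : Int) (cells : Int) :
    visualize_str tape selected_pos start cells = visualize_str_alt tape selected_pos start cells := by
  unfold visualize_str visualize_str_alt
  simp only [PySem.List.foldl_append_eq_flatMap, pvStep_foldl]
  simp only [List.nil_append, List.append_assoc]
  congr 1
  split <;> split <;> simp [pvCenter5, List.replicate] <;> split <;> simp [List.replicate]

-- ===== VERDICT (by name: the statement is the Claim_ definition above) =====
theorem visualize_str_spec : Claim_equal_visualize_str := by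
  intro tape selected_pos start cells _ _
  unfold Spec_visualize_str
  exact visualize_str_eq_alt tape selected_pos start cells
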